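-- pv_equiv track=rewrite | github.com/shenxiangzhuang/data-structures-and-algorithms-in-python | code/Chap3 Algorithm Analysis.py | example3
-- ===== SOURCE A (Python) =====
-- def example3(S):
--     """Return the sum of the elemnets in sequnce S."""
--     n = len(S)
--     total = 0
--     count = 0
--     for j in range(n):
--         for _ in range(1 + j):
--             total += S[j]
--             count += 1
--     return total, count
-- ===== SOURCE B (Python) =====
-- def example3(S):
--     """Return the sum of the elemnets in sequnce S."""
--     total = 0
--     for j, x in enumerate(S):
--         total += (j + 1) * x
--     n = len(S)
--     return total, n * (n + 1) // 2
-- ===== Notes on version B (the rewrite author's own statement) =====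
-- stated objective: faster
-- what changed: Replaces the nested inner repetition loop by a single pass accumulating (j+1)*S[j], with the count given by the closed form n(n+1)//2.
import Mathlib
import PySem

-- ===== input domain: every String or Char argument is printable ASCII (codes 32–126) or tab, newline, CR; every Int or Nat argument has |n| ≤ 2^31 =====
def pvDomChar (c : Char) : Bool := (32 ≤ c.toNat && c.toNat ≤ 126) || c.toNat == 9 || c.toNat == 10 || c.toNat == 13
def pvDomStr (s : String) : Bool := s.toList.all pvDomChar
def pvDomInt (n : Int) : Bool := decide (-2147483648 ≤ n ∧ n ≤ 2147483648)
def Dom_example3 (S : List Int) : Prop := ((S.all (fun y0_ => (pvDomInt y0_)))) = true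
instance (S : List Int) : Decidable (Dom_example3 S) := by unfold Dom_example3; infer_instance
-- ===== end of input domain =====

-- B replaces A's quadratic inner repetition loop by one weighted pass and the closed form n(n+1)//2 for the count (faster, asymptotic).

-- ===== PORT A =====
def example3 (S : List Int) : Int × Int :=
  let n : Int := S.length
  (PySem.List.pyRange 0 n 1).foldl (fun tc j =>
    (PySem.List.pyRange 0 (1 + j) 1).foldl
      (fun tc _ => (tc.1 + PySem.List.pyGetD S j 0, tc.2 + 1)) tc) (0, 0)

-- ===== PORT B =====
def example3_alt (S : List Int) : Int × Int :=
  let total := (PySem.List.enumerate S).foldl (fun t p => t + (p.1 + 1) * p.2) 0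
  let n : Int := S.length
  (total, PySem.Int.floordiv (n * (n + 1)) 2)

-- ===== PRECONDITION & SPEC =====
def Spec_example3 (S : List Int) (out : Int × Int) : Prop := out = example3_alt S
instance (S : List Int) (out : Int × Int) : Decidable (Spec_example3 S out) := by unfold Spec_example3; infer_instance

-- ===== CLAIM (what is proved, stated in full; the proofs are below) =====
def Claim_equal_example3 : Prop := ∀ (S : List Int), Dom_example3 S → Spec_example3 S (example3 S)

-- ===== LEMMAS AND PROOFS =====

-- A's inner loop adds a constant g and 1, (1+j).toNat times
theorem pv_inner_fold (l : List Int) (g : Int) (tc : Int × Int) :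
    l.foldl (fun tc _ => (tc.1 + g, tc.2 + 1)) tc
      = (tc.1 + (l.length : Int) * g, tc.2 + (l.length : Int)) := by
  induction l generalizing tc with
  | nil => simp
  | cons x xs ih =>
    simp only [List.foldl_cons, ih, List.length_cons, Prod.mk.injEq]
    constructor <;> (push_cast; ring)

theorem pv_tri (m : Nat) :
    2 * (((PySem.List.pyRange 0 (m : Int) 1).map (fun j => 1 + j)).sum) = (m : Int) * ((m : Int) + 1) := by
  induction m with
  | zero => simp [PySem.List.pyRange_one_eq_nil]
  | succ m ih =>
    have h : ((m + 1 : Nat) : Int) = (m : Int) + 1 := by push_cast; ring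
    rw [h, PySem.List.pyRange_one_succ_right (by positivity), List.map_append, List.sum_append]
    simp only [List.map_cons, List.map_nil, List.sum_cons, List.sum_nil]
    linarith

-- ===== VERDICT (by name: the statement is the Claim_ definition above) =====
theorem example3_spec : Claim_equal_example3 := by
  intro S _
  unfold Spec_example3 example3 example3_alt
  simp only []
  set n : Int := (S.length : Int) with hn
  have hstep : (PySem.List.pyRange 0 n 1).foldl (fun tc j =>
      (PySem.List.pyRange 0 (1 + j) 1).foldl
        (fun tc _ => (tc.1 + PySem.List.pyGetD S j 0, tc.2 + 1)) tc) ((0 : Int), (0 : Int))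
      = (PySem.List.pyRange 0 n 1).foldl (fun tc j =>
          (tc.1 + (1 + j) * PySem.List.pyGetD S j 0, tc.2 + (1 + j))) ((0 : Int), (0 : Int)) := by
    apply PySem.List.foldl_congr_mem
    intro tc j hj
    have hj0 : 0 ≤ j := by
      have := (PySem.List.mem_pyRange_one).1 hj
      omega
    rw [pv_inner_fold]
    have hlen : ((PySem.List.pyRange 0 (1 + j) 1).length : Int) = 1 + j := by
      rw [PySem.List.length_pyRange_one]
      omega
    rw [hlen]
  rw [hstep]
  rw [PySem.List.foldl_prod_mk (f := fun t j => t + (1 + j) * PySem.List.pyGetD S j 0)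
        (g := fun c j => c + (1 + j))]
  simp only [Prod.mk.injEq]
  constructor
  · -- totals agree
    rw [PySem.List.enumerate_eq_map_pyRange (d := 0), List.foldl_map]
    have hfun : (fun (t j : Int) => t + (1 + j) * PySem.List.pyGetD S j 0)
        = (fun (t j : Int) => t + (j + 1) * PySem.List.pyGetD S j 0) := by
      funext t j; ring
    rw [hfun]
    rfl
  · -- counts: triangular number
    rw [PySem.List.foldl_add (g := fun j => 1 + j)]
    have h2 := pv_tri S.length
    rw [PySem.Int.floordiv_eq_ediv_of_pos (by omega), show n * (n + 1) = 2 * (((PySem.List.pyRange 0 (S.length : Int) 1).map (fun j => 1 + j)).sum) from h2.symm]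
    simp only [hn]
    omega
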